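-- pv_equiv track=rewrite | github.com/dspeziale/realestate | Orem/loader.py | pulisci_santo_testo
-- ===== SOURCE A (Python) =====
-- def pulisci_santo_testo(testo_lista):
--     """
--     Elimina da una lista di stringhe il blocco jQuery fino a "Memoria facoltativa" incluso
--     """
--     filtered_texts = []
--     skip_mode = False
--
--     for t in testo_lista:
--         # Attiva skip_mode quando trovi jQuery
--         if "jQuery('img[data-enlargeable]')" in t:
--             skip_mode = True
--             continue
--
--         # Se siamo in skip_mode, continua a saltare
--         if skip_mode:
--             # Quando trovi "Memoria facoltativa", disattiva e salta anche questa riga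
--             if "Memoria facoltativa" in t:
--                 skip_mode = False
--             continue
--
--         # Aggiungi il testo solo se non siamo in skip_mode
--         filtered_texts.append(t)
--
--     return filtered_texts
-- ===== SOURCE B (Python) =====
-- def pulisci_santo_testo(testo_lista):
--     """
--     Elimina da una lista di stringhe il blocco jQuery fino a "Memoria facoltativa" incluso
--     """
--     out = []
--     it = iter(testo_lista)
--     for t in it:
--         if "jQuery('img[data-enlargeable]')" in t:
--             # salta il blocco sullo stesso iteratore, fino a "Memoria facoltativa" inclusa
--             for u in it:
--                 if "Memoria facoltativa" in u:
--                     break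
--         else:
--             out.append(t)
--     return out
-- ===== Notes on version B (the rewrite author's own statement) =====
-- stated objective: alternative
-- what changed: Replaces the skip_mode boolean flag with nested iteration over one shared iterator (an inner loop drains the jQuery block up to the 'Memoria facoltativa' line); Pre_ excludes lists in which some line contains both markers, where A's restart-the-skip reading and B's end-the-skip reading are equally defensible.
import Mathlib
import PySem

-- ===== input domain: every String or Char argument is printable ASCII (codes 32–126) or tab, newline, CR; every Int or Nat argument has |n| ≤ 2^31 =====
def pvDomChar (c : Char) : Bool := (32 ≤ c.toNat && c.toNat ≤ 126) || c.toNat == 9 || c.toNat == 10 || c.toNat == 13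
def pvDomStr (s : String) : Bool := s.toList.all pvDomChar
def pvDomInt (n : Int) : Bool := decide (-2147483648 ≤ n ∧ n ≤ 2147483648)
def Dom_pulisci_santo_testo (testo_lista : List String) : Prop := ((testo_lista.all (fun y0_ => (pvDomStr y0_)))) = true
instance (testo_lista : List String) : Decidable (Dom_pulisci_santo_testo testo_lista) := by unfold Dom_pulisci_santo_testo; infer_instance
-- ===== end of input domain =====

-- B replaces A's skip_mode flag with nested iteration over one shared cursor (alternative decomposition, same cost); return value only, no mutation involved.

-- ===== PORT A =====
-- one for-loop step over the state (filtered_texts, skip_mode), branches in A's order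
def pvStepA (st : List String × Bool) (t : String) : List String × Bool :=
  if PySem.Str.isIn "jQuery('img[data-enlargeable]')" t then (st.1, true)
  else if st.2 then (st.1, if PySem.Str.isIn "Memoria facoltativa" t then false else st.2)
  else (st.1 ++ [t], st.2)

def pulisci_santo_testo (testo_lista : List String) : List String :=
  (testo_lista.foldl pvStepA ([], false)).1

-- ===== PORT B =====
-- inner 'for u in it' loop: returns the rest of the iterator after the break (all of it if no break)
def pvDrain : List String → List String
  | [] => []
  | u :: us => if PySem.Str.isIn "Memoria facoltativa" u then us else pvDrain us

theorem pvDrain_length_le : ∀ (l : List String), (pvDrain l).length ≤ l.length := by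
  intro l
  induction l with
  | nil => simp [pvDrain]
  | cons u us ih =>
    simp only [pvDrain]
    split
    · simp
    · exact Nat.le_succ_of_le ih

-- outer 'for t in it' loop
def pvGoB : List String → List String
  | [] => []
  | t :: ts =>
    if PySem.Str.isIn "jQuery('img[data-enlargeable]')" t then pvGoB (pvDrain ts)
    else t :: pvGoB ts
termination_by l => l.length
decreasing_by
  all_goals first
    | exact Nat.lt_succ_of_le (pvDrain_length_le ts)
    | (simp only [List.length_cons]; omega)

def pulisci_santo_testo_alt (testo_lista : List String) : List String :=
  pvGoB testo_lista

-- ===== PRECONDITION & SPEC =====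
-- Pre_ excludes lists in which some line contains BOTH markers: there A restarts the skip
-- (its jQuery branch is tested first) while B ends it at the Memoria line — a corner where
-- either reading is defensible and no caller would specify one.
def Pre_pulisci_santo_testo (testo_lista : List String) : Prop :=
  (testo_lista.all (fun s =>
    !(PySem.Str.isIn "jQuery('img[data-enlargeable]')" s &&
      PySem.Str.isIn "Memoria facoltativa" s))) = true
instance (testo_lista : List String) : Decidable (Pre_pulisci_santo_testo testo_lista) := by
  unfold Pre_pulisci_santo_testo; infer_instance

def pvWitness_pulisci_santo_testo : List String :=
  ["intro", "jQuery('img[data-enlargeable]')", "skipped", "Memoria facoltativa", "kept"]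

def Spec_pulisci_santo_testo (testo_lista : List String) (out : List String) : Prop := out = pulisci_santo_testo_alt testo_lista
instance (testo_lista : List String) (out : List String) : Decidable (Spec_pulisci_santo_testo testo_lista out) := by unfold Spec_pulisci_santo_testo; infer_instance

-- ===== CLAIM (what is proved, stated in full; the proofs are below) =====
def Claim_equal_pulisci_santo_testo : Prop := ∀ (testo_lista : List String), Dom_pulisci_santo_testo testo_lista → Pre_pulisci_santo_testo testo_lista → Spec_pulisci_santo_testo testo_lista (pulisci_santo_testo testo_lista)

-- ===== LEMMAS AND PROOFS =====

theorem stepA_jq (st : List String × Bool) (t : String)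
    (h : PySem.Str.isIn "jQuery('img[data-enlargeable]')" t = true) :
    pvStepA st t = (st.1, true) := by
  simp only [pvStepA]; rw [if_pos h]

theorem stepA_skip (st : List String) (t : String)
    (h : ¬ PySem.Str.isIn "jQuery('img[data-enlargeable]')" t = true) :
    pvStepA (st, true) t
      = (st, if PySem.Str.isIn "Memoria facoltativa" t = true then false else true) := by
  simp only [pvStepA]; rw [if_neg h]; simp

theorem stepA_keep (st : List String) (t : String)
    (h : ¬ PySem.Str.isIn "jQuery('img[data-enlargeable]')" t = true) :
    pvStepA (st, false) t = (st ++ [t], false) := by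
  simp only [pvStepA]; rw [if_neg h, if_neg (by simp)]

theorem pvDrain_subset (l : List String) : ∀ x ∈ pvDrain l, x ∈ l := by
  induction l with
  | nil => simp [pvDrain]
  | cons u us ih =>
    simp only [pvDrain]
    split
    · intro x hx; exact List.mem_cons_of_mem _ hx
    · intro x hx; exact List.mem_cons_of_mem _ (ih x hx)

-- the no-both-markers invariant, as a predicate on elements
def pvOk (s : String) : Prop :=
  ¬ (PySem.Str.isIn "jQuery('img[data-enlargeable]')" s = true ∧
     PySem.Str.isIn "Memoria facoltativa" s = true)

-- A's loop in skip mode equals restarting it (skip off) on the drained rest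
theorem foldl_skip_eq_drain (l : List String) (acc : List String)
    (hok : ∀ s ∈ l, pvOk s) :
    (l.foldl pvStepA (acc, true)).1 = ((pvDrain l).foldl pvStepA (acc, false)).1 := by
  induction l generalizing acc with
  | nil => rfl
  | cons u us ih =>
    have hu := hok u (List.mem_cons_self)
    have hus : ∀ s ∈ us, pvOk s := fun s hs => hok s (List.mem_cons_of_mem _ hs)
    rw [List.foldl_cons]
    by_cases hj : PySem.Str.isIn "jQuery('img[data-enlargeable]')" u = true
    · have hm : ¬ PySem.Str.isIn "Memoria facoltativa" u = true := fun hm => hu ⟨hj, hm⟩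
      rw [stepA_jq _ _ hj]
      simp only [pvDrain]
      rw [if_neg hm, ih acc hus]
    · by_cases hm : PySem.Str.isIn "Memoria facoltativa" u = true
      · rw [stepA_skip _ _ hj, if_pos hm]
        simp only [pvDrain]
        rw [if_pos hm]
      · rw [stepA_skip _ _ hj, if_neg hm]
        simp only [pvDrain]
        rw [if_neg hm, ih acc hus]

-- A's loop with skip off accumulates exactly B's output behind acc
theorem foldl_eq_goB (l : List String) (acc : List String)
    (hok : ∀ s ∈ l, pvOk s) :
    (l.foldl pvStepA (acc, false)).1 = acc ++ pvGoB l := by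
  induction hn : l.length using Nat.strong_induction_on generalizing l acc with
  | _ n ih =>
    cases l with
    | nil => simp [pvGoB]
    | cons t ts =>
      have hts : ∀ s ∈ ts, pvOk s := fun s hs => hok s (List.mem_cons_of_mem _ hs)
      rw [List.foldl_cons]
      by_cases hj : PySem.Str.isIn "jQuery('img[data-enlargeable]')" t = true
      · rw [stepA_jq _ _ hj, foldl_skip_eq_drain _ _ hts]
        have hlt : (pvDrain ts).length < n := by
          have := pvDrain_length_le ts; simp at hn; omega
        have hdr : ∀ s ∈ pvDrain ts, pvOk s := fun s hs => hts s (pvDrain_subset ts s hs)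
        rw [ih _ hlt _ acc hdr rfl, pvGoB, if_pos hj]
      · rw [stepA_keep _ _ hj]
        have hlt : ts.length < n := by simp at hn; omega
        rw [ih _ hlt _ (acc ++ [t]) hts rfl, pvGoB, if_neg hj]
        simp

-- ===== VERDICT (by name: the statement is the Claim_ definition above) =====
theorem pulisci_santo_testo_spec : Claim_equal_pulisci_santo_testo := by
  intro l _ hpre
  unfold Spec_pulisci_santo_testo pulisci_santo_testo pulisci_santo_testo_alt
  have hok : ∀ s ∈ l, pvOk s := by
    intro s hs h
    have := (List.all_eq_true.mp hpre) s hs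
    simp [PySem.Str.isIn] at h
    simp [h.1, h.2] at this
  simpa using foldl_eq_goB l [] hok
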